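-- pv_equiv track=rewrite | github.com/AidanAcartis/taskMonitor | Collect_info/Collect_command/command_desc/command_describer_project/command_describer/core/tokenizer.py | split_input_by_commands
-- ===== SOURCE A (Python) =====
-- from typing import List
--
-- def split_input_by_commands(user_input: str) -> List[str]:
--     """
--     Splits the input into multiple commands if a separator is present.
--     Classic separators: |, &&, ;, ||
--     """
--     # simple regex to detect top-level separators (not inside quotes)
--     parts = []
--     cur = []
--     in_s = None
--     i = 0
--     while i < len(user_input):
--         ch = user_input[i]
--         if ch in ("'", '"'):
--             if in_s is None:
--                 in_s = ch
--             elif in_s == ch: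
--                 in_s = None
--             cur.append(ch)
--         elif in_s is None and user_input[i:i+2] in ("&&", "||"):
--             parts.append("".join(cur).strip())
--             cur = []
--             i += 1  # skip next char of &&
--         elif in_s is None and ch in ("|", ";"):
--             parts.append("".join(cur).strip())
--             cur = []
--         else:
--             cur.append(ch)
--         i += 1
--     if cur:
--         parts.append("".join(cur).strip())
--     return [p for p in parts if p != ""]
-- ===== SOURCE B (Python) =====
-- from typing import List, Optional, Tuple
--
-- def _cut_first(s: str) -> Tuple[str, Optional[str]]:
--     """Return (text before the first top-level separator, remainder after it),
--     or (s, None) if there is no top-level separator."""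
--     in_s = None
--     i = 0
--     while i < len(s):
--         ch = s[i]
--         if ch in ("'", '"'):
--             if in_s is None:
--                 in_s = ch
--             elif in_s == ch:
--                 in_s = None
--         elif in_s is None and s[i:i+2] in ("&&", "||"):
--             return s[:i], s[i+2:]
--         elif in_s is None and ch in ("|", ";"):
--             return s[:i], s[i+1:]
--         i += 1
--     return s, None
--
-- def split_input_by_commands(user_input: str) -> List[str]:
--     segs = []
--     rest = user_input
--     while rest is not None:
--         head, rest = _cut_first(rest)
--         segs.append(head)
--     return [t for t in (seg.strip() for seg in segs) if t != ""]
-- ===== Notes on version B (the rewrite author's own statement) =====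
-- stated objective: alternative
-- what changed: A is one accumulating scan that builds per-token character buffers and a growing parts list; B is a recursive decomposition: a helper cuts off the text before the first top-level separator (returning head slice and remainder), the outer loop repeats it on the remainder, then strips and filters the segments in a separate pass.
import Mathlib
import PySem

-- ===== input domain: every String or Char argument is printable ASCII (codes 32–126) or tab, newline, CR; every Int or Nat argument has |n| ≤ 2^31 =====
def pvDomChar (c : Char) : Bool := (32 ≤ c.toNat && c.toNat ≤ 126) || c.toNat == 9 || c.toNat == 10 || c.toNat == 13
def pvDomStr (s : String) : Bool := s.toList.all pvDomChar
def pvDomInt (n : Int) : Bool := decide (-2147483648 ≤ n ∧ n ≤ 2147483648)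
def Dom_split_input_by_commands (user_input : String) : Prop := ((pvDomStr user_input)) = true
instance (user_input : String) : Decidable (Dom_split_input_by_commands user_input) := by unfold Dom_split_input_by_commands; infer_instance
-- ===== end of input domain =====

-- B replaces A's single accumulating scan by a recursive decomposition (cut off the
-- text before the first top-level separator, recurse on the remainder); objective: alternative.

-- "".join(cur).strip()
def pvStrip (cur : List Char) : String := PySem.Str.strip (String.ofList cur)

-- ===== PORT A =====
-- A's while-loop: state (parts, cur, in_s), stepping 1 char (2 on "&&"/"||").
def pvLoopA : List Char → List String → List Char → Option Char → List String
  | [], parts, cur, _ => if cur = [] then parts else parts ++ [pvStrip cur]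
  | c :: rest, parts, cur, inS =>
    if c = '\'' ∨ c = '"' then
      pvLoopA rest parts (cur ++ [c])
        (if inS = none then some c else if inS = some c then none else inS)
    else if inS = none ∧ ((c = '&' ∧ rest.head? = some '&') ∨ (c = '|' ∧ rest.head? = some '|')) then
      pvLoopA rest.tail (parts ++ [pvStrip cur]) [] inS
    else if inS = none ∧ (c = '|' ∨ c = ';') then
      pvLoopA rest (parts ++ [pvStrip cur]) [] inS
    else
      pvLoopA rest parts (cur ++ [c]) inS
termination_by l _ _ _ => l.length
decreasing_by
  · simp
  · simp [List.length_tail]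
  · simp
  · simp

def split_input_by_commands (user_input : String) : List String :=
  (pvLoopA user_input.toList [] [] none).filter (fun p => p != "")

-- ===== PORT B =====
-- _cut_first: text before the first top-level separator, and the remainder (none if no separator).
def pvCutFirst : List Char → Option Char → List Char × Option (List Char)
  | [], _ => ([], none)
  | c :: rest, inS =>
    if c = '\'' ∨ c = '"' then
      let p := pvCutFirst rest
        (if inS = none then some c else if inS = some c then none else inS)
      (c :: p.1, p.2)
    else if inS = none ∧ ((c = '&' ∧ rest.head? = some '&') ∨ (c = '|' ∧ rest.head? = some '|')) then
      ([], some rest.tail)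
    else if inS = none ∧ (c = '|' ∨ c = ';') then
      ([], some rest)
    else
      let p := pvCutFirst rest inS
      (c :: p.1, p.2)

lemma pvCutFirst_rest_lt : ∀ (l : List Char) (inS : Option Char) (h : List Char) (r : List Char),
    pvCutFirst l inS = (h, some r) → r.length < l.length := by
  intro l
  induction l with
  | nil => intro inS h r hr; simp [pvCutFirst] at hr
  | cons c rest ih =>
    intro inS h r hr
    simp only [pvCutFirst] at hr
    split at hr
    · cases hp : pvCutFirst rest (if inS = none then some c else if inS = some c then none else inS) with
      | mk p1 p2 =>
        rw [hp] at hr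
        simp only [Prod.mk.injEq] at hr
        have := ih _ p1 r (by rw [hp, hr.2])
        simp; omega
    · split at hr
      · simp only [Prod.mk.injEq, Option.some.injEq] at hr
        rw [← hr.2]
        cases rest <;> simp
      · split at hr
        · simp only [Prod.mk.injEq, Option.some.injEq] at hr
          rw [← hr.2]; simp
        · cases hp : pvCutFirst rest inS with
          | mk p1 p2 =>
            rw [hp] at hr
            simp only [Prod.mk.injEq] at hr
            have := ih inS p1 r (by rw [hp, hr.2])
            simp; omega

-- the outer while-loop over the remainder
def pvSegs (s : List Char) : List (List Char) :=
  match hm : pvCutFirst s none with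
  | (hd, none) => [hd]
  | (hd, some r) => hd :: pvSegs r
termination_by s.length
decreasing_by exact pvCutFirst_rest_lt s none hd r hm

def split_input_by_commands_alt (user_input : String) : List String :=
  ((pvSegs user_input.toList).map pvStrip).filter (fun t => t != "")

-- ===== PRECONDITION & SPEC =====
def Spec_split_input_by_commands (user_input : String) (out : List String) : Prop := out = split_input_by_commands_alt user_input
instance (user_input : String) (out : List String) : Decidable (Spec_split_input_by_commands user_input out) := by unfold Spec_split_input_by_commands; infer_instance

-- ===== CLAIM (what is proved, stated in full; the proofs are below) =====
def Claim_equal_split_input_by_commands : Prop := ∀ (user_input : String), Dom_split_input_by_commands user_input → Spec_split_input_by_commands user_input (split_input_by_commands user_input)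

-- ===== LEMMAS AND PROOFS =====

-- segments produced from mid-scan state (cur, inS)
def pvSegsFrom (l : List Char) (inS : Option Char) (cur : List Char) : List (List Char) :=
  match pvCutFirst l inS with
  | (hd, none) => [cur ++ hd]
  | (hd, some r) => (cur ++ hd) :: pvSegs r

lemma pvSegs_eq (s : List Char) : pvSegs s = pvSegsFrom s none [] := by
  rw [pvSegs, pvSegsFrom]
  cases h : pvCutFirst s none with
  | mk hd o => cases o <;> simp

lemma pvStrip_nil : pvStrip [] = "" := by decide

lemma pvMain : ∀ (n : Nat) (l : List Char), l.length ≤ n →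
    ∀ (inS : Option Char) (cur : List Char) (parts : List String),
    (pvLoopA l parts cur inS).filter (fun p => p != "") =
      parts.filter (fun p => p != "") ++
        ((pvSegsFrom l inS cur).map pvStrip).filter (fun p => p != "") := by
  intro n
  induction n with
  | zero =>
    intro l hl inS cur parts
    have : l = [] := List.length_eq_zero_iff.mp (Nat.le_zero.mp hl)
    subst this
    cases cur with
    | nil => simp [pvLoopA, pvSegsFrom, pvCutFirst, pvStrip_nil]
    | cons a t => simp [pvLoopA, pvSegsFrom, pvCutFirst, List.filter_append]
  | succ n ih =>
    intro l hl inS cur parts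
    cases l with
    | nil =>
      cases cur with
      | nil => simp [pvLoopA, pvSegsFrom, pvCutFirst, pvStrip_nil]
      | cons a t => simp [pvLoopA, pvSegsFrom, pvCutFirst, List.filter_append]
    | cons c rest =>
      simp only [List.length_cons] at hl
      by_cases hq : c = '\'' ∨ c = '"'
      · rw [show pvLoopA (c :: rest) parts cur inS
              = pvLoopA rest parts (cur ++ [c])
                  (if inS = none then some c else if inS = some c then none else inS) from by
            rw [pvLoopA]; simp [hq]]
        rw [ih rest (by omega) _ (cur ++ [c]) parts]
        congr 2
        unfold pvSegsFrom
        rw [show pvCutFirst (c :: rest) inS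
              = ((c :: (pvCutFirst rest (if inS = none then some c else if inS = some c then none else inS)).1),
                 (pvCutFirst rest (if inS = none then some c else if inS = some c then none else inS)).2) from by
            rw [pvCutFirst]; simp [hq]]
        cases hp : pvCutFirst rest (if inS = none then some c else if inS = some c then none else inS) with
        | mk p1 p2 => cases p2 <;> simp
      · by_cases hs2 : inS = none ∧ ((c = '&' ∧ rest.head? = some '&') ∨ (c = '|' ∧ rest.head? = some '|'))
        · rw [show pvLoopA (c :: rest) parts cur inS
                = pvLoopA rest.tail (parts ++ [pvStrip cur]) [] inS from by
              rw [pvLoopA]; simp [hq, hs2]]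
          have htl : rest.tail.length ≤ n := by
            have : rest.tail.length = rest.length - 1 := by simp
            omega
          rw [ih rest.tail htl inS [] (parts ++ [pvStrip cur])]
          rw [hs2.1]
          rw [show pvSegsFrom (c :: rest) none cur = (cur ++ []) :: pvSegs rest.tail from by
            unfold pvSegsFrom
            rw [show pvCutFirst (c :: rest) none = ([], some rest.tail) from by
              rw [pvCutFirst]; rw [if_neg hq, if_pos ⟨rfl, hs2.2⟩]]]
          rw [← pvSegs_eq]
          simp [List.filter_append, List.filter_cons]
          split_ifs <;> simp
        · by_cases hs1 : inS = none ∧ (c = '|' ∨ c = ';')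
          · rw [show pvLoopA (c :: rest) parts cur inS
                  = pvLoopA rest (parts ++ [pvStrip cur]) [] inS from by
                rw [pvLoopA]; rw [if_neg hq, if_neg hs2, if_pos hs1]]
            rw [ih rest (by omega) inS [] (parts ++ [pvStrip cur])]
            rw [hs1.1]
            rw [show pvSegsFrom (c :: rest) none cur = (cur ++ []) :: pvSegs rest from by
              unfold pvSegsFrom
              rw [show pvCutFirst (c :: rest) none = ([], some rest) from by
                rw [pvCutFirst]
                have h2 : ¬ ((none : Option Char) = none ∧ ((c = '&' ∧ rest.head? = some '&') ∨ (c = '|' ∧ rest.head? = some '|'))) := by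
                  rw [hs1.1] at hs2; exact hs2
                rw [if_neg hq, if_neg h2, if_pos ⟨rfl, hs1.2⟩]]]
            rw [← pvSegs_eq]
            simp [List.filter_append, List.filter_cons]
            split_ifs <;> simp
          · rw [show pvLoopA (c :: rest) parts cur inS
                  = pvLoopA rest parts (cur ++ [c]) inS from by
                rw [pvLoopA]; simp [hq, hs2, hs1]]
            rw [ih rest (by omega) inS (cur ++ [c]) parts]
            congr 2
            unfold pvSegsFrom
            rw [show pvCutFirst (c :: rest) inS
                  = ((c :: (pvCutFirst rest inS).1), (pvCutFirst rest inS).2) from by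
                rw [pvCutFirst]; simp [hq, hs2, hs1]]
            cases hp : pvCutFirst rest inS with
            | mk p1 p2 => cases p2 <;> simp

-- ===== VERDICT (by name: the statement is the Claim_ definition above) =====
theorem split_input_by_commands_spec : Claim_equal_split_input_by_commands := by
  intro s _
  unfold Spec_split_input_by_commands split_input_by_commands split_input_by_commands_alt
  rw [pvMain s.toList.length s.toList le_rfl none [] [], pvSegs_eq]
  simp
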